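-- pv_equiv track=rewrite | github.com/kckoh/xflow | spark/jobs/kafka_streaming_runner.py | __escape_at_identifiers_segment
-- ===== SOURCE A (Python) =====
-- def __escape_at_identifiers_segment(segment: str) -> str:
--     out = []
--     i = 0
--     while i < len(segment):
--         if segment[i] == "`":
--             end = segment.find("`", i + 1)
--             if end == -1:
--                 out.append(segment[i:])
--                 break
--             out.append(segment[i:end + 1])
--             i = end + 1
--             continue
--
--         if segment[i] == "@":
--             j = i + 1
--             while j < len(segment) and (segment[j].isalnum() or segment[j] == "_"):
--                 j += 1
--             if j > i + 1:
--                 out.append("`")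
--                 out.append(segment[i:j])
--                 out.append("`")
--                 i = j
--                 continue
--         out.append(segment[i])
--         i += 1
--     return "".join(out)
-- ===== SOURCE B (Python) =====
-- def _escape_outside(text):
--     # escape @identifiers in a region with no backticks, by splitting on '@'
--     chunks = text.split('@')
--     res = [chunks[0]]
--     for ch in chunks[1:]:
--         n = 0
--         while n < len(ch) and (ch[n].isalnum() or ch[n] == '_'):
--             n += 1
--         if n:
--             res.append('`@' + ch[:n] + '`' + ch[n:])
--         else:
--             res.append('@' + ch)
--     return ''.join(res)
--
--
-- def __escape_at_identifiers_segment(segment: str) -> str: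
--     parts = segment.split('`')
--     out = [_escape_outside(parts[0])]
--     quoted = parts[1:]
--     while quoted:
--         if len(quoted) == 1:  # trailing unclosed backtick: rest is verbatim
--             out.append('`' + quoted[0])
--             break
--         out.append('`' + quoted[0] + '`')
--         out.append(_escape_outside(quoted[1]))
--         quoted = quoted[2:]
--     return ''.join(out)
-- ===== Notes on version B (the rewrite author's own statement) =====
-- stated objective: faster
-- what changed: A's single index-driven while-loop with find() and an inner cursor loop is replaced by a split-on-'`' decomposition (alternating outside/quoted parts) where each outside part is itself handled by split-on-'@' with only the leading identifier run of each chunk wrapped in backticks.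
import Mathlib
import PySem

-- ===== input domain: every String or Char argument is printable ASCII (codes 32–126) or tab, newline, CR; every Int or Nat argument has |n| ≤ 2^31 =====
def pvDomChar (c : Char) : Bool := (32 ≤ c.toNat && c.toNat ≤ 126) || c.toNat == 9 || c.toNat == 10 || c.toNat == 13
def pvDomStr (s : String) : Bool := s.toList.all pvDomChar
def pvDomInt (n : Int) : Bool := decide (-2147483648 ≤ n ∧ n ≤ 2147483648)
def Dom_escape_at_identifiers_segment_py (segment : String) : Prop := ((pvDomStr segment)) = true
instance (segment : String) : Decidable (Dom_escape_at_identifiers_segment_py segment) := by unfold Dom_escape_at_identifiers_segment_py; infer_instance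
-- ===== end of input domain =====

-- B replaces A's index-juggling while-loop by a split-on-'`' / split-on-'@' decomposition (measured faster in Python via C-level str.split); same return value.

-- ===== PORT A =====
-- identifier characters: isalnum() or '_'
def pvIdentChar (c : Char) : Bool := PySem.Chars.isalnum c || c == '_'

-- A's while-loop, transliterated with the current suffix standing for index i;
-- segment.find("`", i+1) is the dropWhile scan, the inner j-loop is the takeWhile scan.
def pvGoA : List Char → List Char
  | [] => []
  | c :: rest =>
    if c = '`' then
      let post := rest.dropWhile (fun x => !(x == '`'))
      if post.isEmpty then c :: rest                 -- end == -1: append segment[i:], break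
      else (c :: rest.takeWhile (fun x => !(x == '`')) ++ ['`']) ++ pvGoA post.tail
    else if c = '@' then
      let run := rest.takeWhile pvIdentChar          -- the inner while on j
      if run.isEmpty then c :: pvGoA rest            -- j == i+1: fall through
      else ('`' :: c :: run ++ ['`']) ++ pvGoA (rest.drop run.length)
    else c :: pvGoA rest
termination_by cs => cs.length
decreasing_by
  all_goals
    first
    | (have h1 := List.length_dropWhile_le (fun x => !(x == '`')) rest
       simp only [List.length_tail, List.length_cons] at *
       omega)
    | (simp only [List.length_cons, List.length_drop]; omega)

def escape_at_identifiers_segment_py (segment : String) : String :=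
  String.mk (pvGoA segment.toList)

-- ===== PORT B =====
-- escape one '@'-chunk: leading identifier run gets wrapped in backticks
def pvEscAt (p : List Char) : List Char :=
  let run := p.takeWhile pvIdentChar
  if run.isEmpty then '@' :: p
  else ('`' :: '@' :: run ++ ['`']) ++ p.drop run.length

-- _escape_outside: split on '@', keep chunk 0, escape each later chunk
def pvEscOutside (t : List Char) : List Char :=
  match t.splitOn '@' with
  | [] => []
  | p0 :: ps => p0 ++ ps.flatMap pvEscAt

-- consume the parts after parts[0] two at a time: quoted region, then outside region
def pvGoB : List (List Char) → List Char
  | [] => []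
  | [q] => '`' :: q                                  -- trailing unclosed backtick: verbatim
  | q :: p :: rest => ('`' :: q ++ ['`']) ++ pvEscOutside p ++ pvGoB rest

def escape_at_identifiers_segment_py_alt (segment : String) : String :=
  String.mk
    (match segment.toList.splitOn '`' with
     | [] => []
     | p0 :: qs => pvEscOutside p0 ++ pvGoB qs)

-- ===== PRECONDITION & SPEC =====
def Spec_escape_at_identifiers_segment_py (segment : String) (out : String) : Prop := out = escape_at_identifiers_segment_py_alt segment
instance (segment : String) (out : String) : Decidable (Spec_escape_at_identifiers_segment_py segment out) := by unfold Spec_escape_at_identifiers_segment_py; infer_instance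

-- ===== CLAIM (what is proved, stated in full; the proofs are below) =====
def Claim_equal_escape_at_identifiers_segment_py : Prop := ∀ (segment : String), Dom_escape_at_identifiers_segment_py segment → Spec_escape_at_identifiers_segment_py segment (escape_at_identifiers_segment_py segment)

-- ===== LEMMAS AND PROOFS =====

theorem pv_splitOn_cons (a c : Char) (xs : List Char) :
    (c :: xs).splitOn a =
      if c == a then [] :: xs.splitOn a else (xs.splitOn a).modifyHead (c :: ·) := by
  simp [List.splitOn, List.splitOnP_cons]

theorem pv_splitOn_ne_nil (a : Char) (xs : List Char) : xs.splitOn a ≠ [] :=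
  List.splitOnP_ne_nil _ xs

theorem pvEscOutside_nil : pvEscOutside [] = [] := by
  simp [pvEscOutside, List.splitOn, List.splitOnP_nil]

theorem pvEscOutside_cons_ne (c : Char) (cs : List Char) (h : c ≠ '@') :
    pvEscOutside (c :: cs) = c :: pvEscOutside cs := by
  obtain ⟨q0, qs, hq⟩ := List.exists_cons_of_ne_nil (pv_splitOn_ne_nil '@' cs)
  rw [pvEscOutside, pv_splitOn_cons, if_neg (by simpa using h), hq]
  simp [pvEscOutside, hq]

theorem pv_takeWhile_takeWhile (p q : Char → Bool) (xs : List Char)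
    (h : ∀ c, p c = true → q c = true) :
    (xs.takeWhile q).takeWhile p = xs.takeWhile p := by
  induction xs with
  | nil => rfl
  | cons c t ih =>
    by_cases hp : p c = true
    · rw [List.takeWhile_cons, if_pos (h c hp)]
      simp [List.takeWhile_cons, hp, ih]
    · rw [List.takeWhile_cons]
      by_cases hq : q c = true
      · simp [hq, List.takeWhile_cons, hp]
      · simp [hq, List.takeWhile_cons, hp]

theorem pv_ident_ne_at (c : Char) (h : pvIdentChar c = true) : ¬ (c == '@') = true := by
  simp only [beq_iff_eq]; rintro rfl; exact absurd h (by decide)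

theorem pv_splitOn_eq (a : Char) (cs : List Char) :
    cs.splitOn a = cs.takeWhile (fun x => !(x == a)) ::
      (match cs.dropWhile (fun x => !(x == a)) with
       | [] => []
       | _ :: t => t.splitOn a) := by
  induction cs with
  | nil => simp [List.splitOn, List.splitOnP_nil]
  | cons c t ih =>
    by_cases hca : (c == a) = true
    · rw [pv_splitOn_cons, if_pos hca]
      simp [List.takeWhile_cons, List.dropWhile_cons, hca]
    · rw [pv_splitOn_cons, if_neg hca, ih]
      simp [List.takeWhile_cons, List.dropWhile_cons, hca]

theorem pv_dropWhile_cases (p : Char → Bool) (xs : List Char) :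
    xs.dropWhile p = [] ∨ ∃ c t, xs.dropWhile p = c :: t ∧ p c = false := by
  induction xs with
  | nil => exact Or.inl rfl
  | cons c t ih =>
    by_cases hp : p c = true
    · simpa [List.dropWhile_cons, hp] using ih
    · exact Or.inr ⟨c, t, by simp [List.dropWhile_cons, hp], by simpa using hp⟩

theorem pv_dropWhile_append_all (p : Char → Bool) (xs ys : List Char)
    (h : ∀ c ∈ xs, p c = true) :
    (xs ++ ys).dropWhile p = ys.dropWhile p := by
  induction xs with
  | nil => rfl
  | cons c t ih =>
    simp only [List.cons_append, List.dropWhile_cons, h c (List.mem_cons_self ..)]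
    exact ih (fun x hx => h x (List.mem_cons_of_mem _ hx))

theorem pv_takeWhile_append_stop (p : Char → Bool) (xs ys : List Char)
    (hy : ys.takeWhile p = []) :
    (xs ++ ys).takeWhile p = xs.takeWhile p := by
  induction xs with
  | nil => simpa using hy
  | cons c t ih =>
    by_cases hp : p c = true
    · simp only [List.cons_append, List.takeWhile_cons, hp, if_pos]; rw [ih]
    · simp [List.takeWhile_cons, hp]

theorem pv_takeWhile_dropWhile_nil (p : Char → Bool) (xs : List Char) :
    (xs.dropWhile p).takeWhile p = [] := by
  rcases pv_dropWhile_cases p xs with h | ⟨c, t, h, hc⟩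
  · simp [h]
  · simp [h, List.takeWhile_cons, hc]

theorem pv_dropWhile_dropWhile (p : Char → Bool) (xs : List Char) :
    (xs.dropWhile p).dropWhile p = xs.dropWhile p := by
  rcases pv_dropWhile_cases p xs with h | ⟨c, t, h, hc⟩
  · simp [h]
  · simp [h, List.dropWhile_cons, hc]

theorem pv_ident_imp (c : Char) (h : pvIdentChar c = true) : (!(c == '@')) = true := by
  simpa using pv_ident_ne_at c h

theorem pvEscOutside_cons_at (cs : List Char) :
    pvEscOutside ('@' :: cs) =
      (let run := cs.takeWhile pvIdentChar;
       if run.isEmpty then '@' :: pvEscOutside cs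
       else ('`' :: '@' :: run ++ ['`']) ++ pvEscOutside (cs.drop run.length)) := by
  have hq0 : ∀ c ∈ cs.takeWhile (fun x => !(x == '@')), (!(c == '@')) = true :=
    fun c hc => List.mem_takeWhile_imp (p := fun x => !(x == '@')) hc
  have hsplit := pv_splitOn_eq '@' cs
  have hrun : (cs.takeWhile (fun x => !(x == '@'))).takeWhile pvIdentChar
      = cs.takeWhile pvIdentChar := pv_takeWhile_takeWhile _ _ _ pv_ident_imp
  have hL : pvEscOutside ('@' :: cs)
      = pvEscAt (cs.takeWhile (fun x => !(x == '@')))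
        ++ (match cs.dropWhile (fun x => !(x == '@')) with
            | [] => []
            | _ :: t => t.splitOn '@').flatMap pvEscAt := by
    rw [pvEscOutside, pv_splitOn_cons]
    simp only [beq_self_eq_true, if_pos, hsplit]
    simp
  by_cases hempty : (cs.takeWhile pvIdentChar).isEmpty = true
  · rw [hL]
    have hat : pvEscAt (cs.takeWhile (fun x => !(x == '@')))
        = '@' :: cs.takeWhile (fun x => !(x == '@')) := by
      rw [pvEscAt]; simp only [hrun, hempty, if_pos]
    rw [hat]
    simp only [hempty, if_pos]
    rw [pvEscOutside, hsplit]
    simp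
  · have hlen : (cs.takeWhile pvIdentChar).length
        ≤ (cs.takeWhile (fun x => !(x == '@'))).length := by
      rw [← hrun]; exact (List.takeWhile_sublist _).length_le
    have hdecomp : cs = cs.takeWhile (fun x => !(x == '@'))
        ++ cs.dropWhile (fun x => !(x == '@')) := (List.takeWhile_append_dropWhile ..).symm
    have hdrop : cs.drop (cs.takeWhile pvIdentChar).length
        = (cs.takeWhile (fun x => !(x == '@'))).drop (cs.takeWhile pvIdentChar).length
          ++ cs.dropWhile (fun x => !(x == '@')) := by
      conv_rhs => rw [← List.drop_append_of_le_length hlen]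
      rw [← hdecomp]
    have hsub : ∀ c ∈ (cs.takeWhile (fun x => !(x == '@'))).drop
        (cs.takeWhile pvIdentChar).length, (!(c == '@')) = true :=
      fun c hc => hq0 c ((List.drop_sublist _ _).subset hc)
    have htw : (cs.drop (cs.takeWhile pvIdentChar).length).takeWhile (fun x => !(x == '@'))
        = (cs.takeWhile (fun x => !(x == '@'))).drop (cs.takeWhile pvIdentChar).length := by
      rw [hdrop, pv_takeWhile_append_stop _ _ _ (pv_takeWhile_dropWhile_nil _ _)]
      exact List.takeWhile_eq_self_iff.mpr hsub
    have hdw : (cs.drop (cs.takeWhile pvIdentChar).length).dropWhile (fun x => !(x == '@'))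
        = cs.dropWhile (fun x => !(x == '@')) := by
      rw [hdrop, pv_dropWhile_append_all _ _ _ hsub, pv_dropWhile_dropWhile]
    have hR : pvEscOutside (cs.drop (cs.takeWhile pvIdentChar).length)
        = (cs.takeWhile (fun x => !(x == '@'))).drop (cs.takeWhile pvIdentChar).length
          ++ (match cs.dropWhile (fun x => !(x == '@')) with
              | [] => []
              | _ :: t => t.splitOn '@').flatMap pvEscAt := by
      rw [pvEscOutside, pv_splitOn_eq, htw, hdw]
    have hat : pvEscAt (cs.takeWhile (fun x => !(x == '@')))
        = ('`' :: '@' :: cs.takeWhile pvIdentChar ++ ['`'])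
          ++ (cs.takeWhile (fun x => !(x == '@'))).drop (cs.takeWhile pvIdentChar).length := by
      rw [pvEscAt]; simp only [hrun, hempty, if_neg, Bool.false_eq_true, not_false_iff]
    rw [hL, hat]
    simp only [hempty, if_neg, Bool.false_eq_true, not_false_iff, hR]
    simp

theorem pv_L1 (n : Nat) (pre post : List Char) (hn : pre.length ≤ n)
    (hpre : ∀ c ∈ pre, c ≠ '`')
    (hpost : post = [] ∨ ∃ t, post = '`' :: t) :
    pvGoA (pre ++ post) = pvEscOutside pre ++ pvGoA post := by
  induction n generalizing pre with
  | zero =>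
    have : pre = [] := List.length_eq_zero_iff.mp (Nat.le_zero.mp hn)
    subst this; simp [pvEscOutside_nil]
  | succ n ih =>
    match pre with
    | [] => simp [pvEscOutside_nil]
    | c :: pre2 =>
      have hc : c ≠ '`' := hpre c (List.mem_cons_self ..)
      have hpre2 : ∀ x ∈ pre2, x ≠ '`' := fun x hx => hpre x (List.mem_cons_of_mem _ hx)
      have hn2 : pre2.length ≤ n := by simpa using hn
      have hposttw : post.takeWhile pvIdentChar = [] := by
        have hbt : pvIdentChar '`' = false := by decide
        rcases hpost with h | ⟨t, h⟩ <;> subst h <;> simp [List.takeWhile_cons, hbt]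
      rw [List.cons_append, pvGoA, if_neg hc]
      by_cases hat : c = '@'
      · subst hat
        simp only [if_pos]
        have hrun : (pre2 ++ post).takeWhile pvIdentChar = pre2.takeWhile pvIdentChar :=
          pv_takeWhile_append_stop _ _ _ hposttw
        rw [hrun]
        by_cases hempty : (pre2.takeWhile pvIdentChar).isEmpty = true
        · rw [if_pos hempty, ih pre2 hn2 hpre2, pvEscOutside_cons_at]
          simp [hempty]
        · rw [if_neg hempty]
          have hlen : (pre2.takeWhile pvIdentChar).length ≤ pre2.length :=
            (List.takeWhile_sublist _).length_le
          have hdrop : (pre2 ++ post).drop (pre2.takeWhile pvIdentChar).length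
              = pre2.drop (pre2.takeWhile pvIdentChar).length ++ post :=
            List.drop_append_of_le_length hlen
          have hn3 : (pre2.drop (pre2.takeWhile pvIdentChar).length).length ≤ n := by
            have := List.length_drop (l := pre2) (i := (pre2.takeWhile pvIdentChar).length)
            omega
          have hpre3 : ∀ x ∈ pre2.drop (pre2.takeWhile pvIdentChar).length, x ≠ '`' :=
            fun x hx => hpre2 x ((List.drop_sublist _ _).subset hx)
          rw [hdrop, ih _ hn3 hpre3, pvEscOutside_cons_at]
          simp only [hempty, if_neg, Bool.false_eq_true, not_false_iff]
          simp
      · rw [if_neg hat, ih pre2 hn2 hpre2, pvEscOutside_cons_ne _ _ hat]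
        simp

theorem pv_main (n : Nat) (cs : List Char) (hn : cs.length ≤ n) :
    pvGoA cs = (match cs.splitOn '`' with
                | [] => []
                | p0 :: qs => pvEscOutside p0 ++ pvGoB qs) := by
  induction n generalizing cs with
  | zero =>
    have : cs = [] := List.length_eq_zero_iff.mp (Nat.le_zero.mp hn)
    subst this
    simp [List.splitOn, List.splitOnP_nil, pvEscOutside_nil, pvGoB, pvGoA]
  | succ n ih =>
    have hpre : ∀ c ∈ cs.takeWhile (fun x => !(x == '`')), c ≠ '`' := by
      intro c hc
      have := List.mem_takeWhile_imp hc
      simpa using this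
    have hdecomp : cs = cs.takeWhile (fun x => !(x == '`'))
        ++ cs.dropWhile (fun x => !(x == '`')) := (List.takeWhile_append_dropWhile ..).symm
    have hsplit := pv_splitOn_eq '`' cs
    rcases pv_dropWhile_cases (fun x => !(x == '`')) cs with hr | ⟨c, t, hr, hcb⟩
    · have hs1 : cs.splitOn '`' = [cs.takeWhile (fun x => !(x == '`'))] := by
        rw [hsplit, hr]
      rw [hs1]
      conv_lhs => rw [hdecomp, hr]
      rw [pv_L1 (cs.takeWhile (fun x => !(x == '`'))).length _ [] le_rfl hpre (Or.inl rfl)]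
      simp [pvGoB, pvGoA]
    · have hc : c = '`' := by
        by_contra h
        simp [h] at hcb
      subst hc
      have hsplit2 : cs.splitOn '`'
          = cs.takeWhile (fun x => !(x == '`')) :: t.splitOn '`' := by
        rw [hsplit, hr]
      rw [hsplit2]
      conv_lhs => rw [hdecomp, hr]
      rw [pv_L1 (cs.takeWhile (fun x => !(x == '`'))).length _ ('`' :: t)
        le_rfl hpre (Or.inr ⟨t, rfl⟩)]
      congr 1
      have hlen1 : (cs.takeWhile (fun x => !(x == '`'))).length + t.length + 1 = cs.length := by
        conv_rhs => rw [hdecomp, hr]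
        simp
        omega
      rw [pvGoA]
      simp only [if_pos]
      have hsplitT := pv_splitOn_eq '`' t
      rcases pv_dropWhile_cases (fun x => !(x == '`')) t with hr2 | ⟨c2, t2, hr2, hcb2⟩
      · have hempty : (t.dropWhile (fun x => !(x == '`'))).isEmpty = true := by
          rw [hr2]; rfl
        rw [if_pos hempty]
        have htT : t.takeWhile (fun x => !(x == '`')) = t := by
          conv_rhs => rw [(List.takeWhile_append_dropWhile
            (p := fun x => !(x == '`')) (l := t)).symm, hr2, List.append_nil]
        rw [hsplitT, hr2, htT]
        simp [pvGoB]
      · have hc2 : c2 = '`' := by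
          by_contra h
          simp [h] at hcb2
        subst hc2
        have hempty : ¬ (t.dropWhile (fun x => !(x == '`'))).isEmpty = true := by
          rw [hr2]; simp
        rw [if_neg hempty, hr2]
        obtain ⟨r0, rt, hrt⟩ := List.exists_cons_of_ne_nil (pv_splitOn_ne_nil '`' t2)
        have hsplitT2 : t.splitOn '`'
            = t.takeWhile (fun x => !(x == '`')) :: t2.splitOn '`' := by
          rw [hsplitT, hr2]
        have hlen2 : t2.length ≤ n := by
          have hlenT : (t.takeWhile (fun x => !(x == '`'))).length + t2.length + 1
              = t.length := by
            conv_rhs => rw [(List.takeWhile_append_dropWhile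
              (p := fun x => !(x == '`')) (l := t)).symm, hr2]
            simp
            omega
          omega
        rw [hsplitT2, hrt, List.tail_cons, ih t2 hlen2, hrt]
        simp [pvGoB]

-- ===== VERDICT (by name: the statement is the Claim_ definition above) =====
theorem escape_at_identifiers_segment_py_spec : Claim_equal_escape_at_identifiers_segment_py := by
  intro segment _
  unfold Spec_escape_at_identifiers_segment_py escape_at_identifiers_segment_py
    escape_at_identifiers_segment_py_alt
  rw [pv_main segment.toList.length segment.toList le_rfl]
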